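-- pv_equiv track=rewrite | github.com/jennyzzt/LLM_debate_on_ARC | ARC_gen_agents3_rounds2_openai/b775ac94/agent2/algo.py | solve
-- ===== SOURCE A (Python) =====
-- def solve(input):
--     # Initialize the output grid with the same dimensions as the input grid
--     output = [[0 for _ in range(len(input[0]))] for _ in range(len(input))]
--
--     # Define a function to safely set a value in the output grid (checks bounds)
--     def set_value(i, j, value):
--         if 0 <= i < len(output) and 0 <= j < len(output[0]):
--             output[i][j] = value
--
--     # Iterate through the input grid to apply transformation rules
--     for i in range(len(input)):
--         for j in range(len(input[0])):
--             # Directly copy the value from the input to the output grid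
--             output[i][j] = input[i][j]
--
--             # Apply specific transformation rules based on observed patterns
--             # Example: Mirror '8's horizontally
--             if input[i][j] == 8:
--                 set_value(i, j+1, 8) if j+1 < len(input[0]) else None
--                 set_value(i, j-1, 8) if j-1 >= 0 else None
--
--             # Example: Expand '2's vertically
--             if input[i][j] == 2:
--                 set_value(i+1, j, 2) if i+1 < len(input) else None
--                 set_value(i-1, j, 2) if i-1 >= 0 else None
--
--             # Additional rules can be added here based on further pattern analysis
--
--     return output
-- ===== SOURCE B (Python) =====
-- def solve(input):
--     rows = len(input)
--
--     def cell(i, j):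
--         if i + 1 < rows and input[i + 1][j] == 2:
--             return 2
--         if j + 1 < len(input[0]) and input[i][j + 1] == 8:
--             return 8
--         return input[i][j]
--
--     return [[cell(i, j) for j in range(len(input[0]))] for i in range(rows)]
-- ===== Notes on version B (the rewrite author's own statement) =====
-- stated objective: simpler
-- what changed: B computes each output cell directly as a pure gather from the input (cell value, overridden by 8 if the right neighbour is 8, then by 2 if the cell below is 2), replacing A's in-place neighbour-scatter writes into a mutable zero grid.
import Mathlib
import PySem

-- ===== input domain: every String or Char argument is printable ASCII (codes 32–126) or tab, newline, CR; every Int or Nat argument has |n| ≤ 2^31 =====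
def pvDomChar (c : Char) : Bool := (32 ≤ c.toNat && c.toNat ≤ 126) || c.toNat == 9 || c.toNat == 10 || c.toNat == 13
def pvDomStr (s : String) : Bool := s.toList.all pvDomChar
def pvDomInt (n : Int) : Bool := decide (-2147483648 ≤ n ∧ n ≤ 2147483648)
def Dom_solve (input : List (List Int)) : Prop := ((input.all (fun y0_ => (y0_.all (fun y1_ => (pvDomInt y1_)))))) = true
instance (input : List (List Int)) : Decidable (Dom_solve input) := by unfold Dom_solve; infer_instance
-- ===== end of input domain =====

-- B rebuilds the output as a pure per-cell gather (value, overridden by 8 from the right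
-- neighbour, then by 2 from below) instead of A's in-place neighbour scatter: simpler, same values.

-- ===== PORT A =====
-- input value at (a, b); getD stands for Python indexing, exact under Pre_ (indices in range there)
def solveIn (input : List (List Int)) (a b : Nat) : Int := (input.getD a []).getD b 0

-- port of A's set_value: bounds-checked write into the output grid (Int indices as in Python)
def solveSetValue (g : List (List Int)) (i j : Int) (v : Int) : List (List Int) :=
  if 0 ≤ i ∧ i < (g.length : Int) ∧ 0 ≤ j ∧ j < ((g.headD []).length : Int) then
    g.set i.toNat ((g.getD i.toNat []).set j.toNat v)
  else g

-- body of A's inner loop at cell (i, j): copy, then the 8- and 2-rules with their bound checks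
def solveStep (input : List (List Int)) (g : List (List Int)) (i j : Nat) : List (List Int) :=
  let rows := input.length
  let cols := (input.headD []).length
  let g := g.set i ((g.getD i []).set j (solveIn input i j))
  let g := if solveIn input i j = 8 then
      let g := if (j : Int) + 1 < (cols : Int) then solveSetValue g i ((j : Int) + 1) 8 else g
      if (j : Int) - 1 ≥ 0 then solveSetValue g i ((j : Int) - 1) 8 else g
    else g
  if solveIn input i j = 2 then
      let g := if (i : Int) + 1 < (rows : Int) then solveSetValue g ((i : Int) + 1) j 2 else g
      if (i : Int) - 1 ≥ 0 then solveSetValue g ((i : Int) - 1) j 2 else g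
    else g

def solve (input : List (List Int)) : List (List Int) :=
  let rows := input.length
  let cols := (input.headD []).length
  let output := (List.range rows).map (fun _ => (List.range cols).map (fun _ => (0 : Int)))
  (List.range rows).foldl (fun g i =>
    (List.range cols).foldl (fun g j => solveStep input g i j) g) output

-- ===== PORT B =====
def solve_alt (input : List (List Int)) : List (List Int) :=
  let rows := input.length
  (List.range rows).map (fun i =>
    (List.range (input.headD []).length).map (fun j =>
      if i + 1 < rows ∧ (input.getD (i + 1) []).getD j 0 = 2 then 2
      else if j + 1 < (input.headD []).length ∧ (input.getD i []).getD (j + 1) 0 = 8 then 8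
      else (input.getD i []).getD j 0))

-- ===== PRECONDITION & SPEC =====
-- Pre_ excludes exactly the inputs on which Python A raises IndexError: non-empty grids
-- with some row shorter than the first row (input[i][j] fails there).
def Pre_solve (input : List (List Int)) : Prop :=
  ∀ row ∈ input, (input.headD []).length ≤ row.length
instance (input : List (List Int)) : Decidable (Pre_solve input) := by unfold Pre_solve; infer_instance

def pvWitness_solve : List (List Int) := [[8, 2, 0], [0, 0, 8], [2, 1, 0]]

def Spec_solve (input : List (List Int)) (out : List (List Int)) : Prop := out = solve_alt input
instance (input : List (List Int)) (out : List (List Int)) : Decidable (Spec_solve input out) := by unfold Spec_solve; infer_instance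

-- ===== CLAIM (what is proved, stated in full; the proofs are below) =====
def Claim_equal_solve : Prop := ∀ (input : List (List Int)), Dom_solve input → Pre_solve input → Spec_solve input (solve input)

-- ===== LEMMAS AND PROOFS =====
-- Strategy: both ports produce, cell by cell, the grid described by Ecell — the state of A's
-- output while its loops stand at frontier (i, j) — and the final frontier value equals B's gather.

def mapGrid (R C : Nat) (f : Nat → Nat → Int) : List (List Int) :=
  (List.range R).map (fun a => (List.range C).map (fun b => f a b))
def updF (f : Nat → Nat → Int) (a b : Nat) (v : Int) : Nat → Nat → Int :=
  fun x y => if x = a ∧ y = b then v else f x y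

theorem mapGrid_headD (R C : Nat) (f : Nat → Nat → Int) (hR : 0 < R) :
    ((mapGrid R C f).headD []).length = C := by
  obtain ⟨n, rfl⟩ := Nat.exists_eq_add_of_lt hR
  simp [mapGrid, List.range_succ_eq_map]

theorem mapGrid_getD (R C a : Nat) (f : Nat → Nat → Int) (ha : a < R) :
    (mapGrid R C f).getD a [] = (List.range C).map (fun b => f a b) := by
  rw [List.getD_eq_getElem _ _ (by simpa [mapGrid] using ha)]
  simp [mapGrid]

theorem mapGrid_set (R C a b : Nat) (f : Nat → Nat → Int) (v : Int) (ha : a < R) (hb : b < C) :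
    (mapGrid R C f).set a (((mapGrid R C f).getD a []).set b v) = mapGrid R C (updF f a b v) := by
  rw [mapGrid_getD R C a f ha]
  apply List.ext_getElem
  · simp [mapGrid]
  intro n h1 h2
  have hn : n < R := by simpa [mapGrid] using h2
  simp only [mapGrid, List.getElem_set, List.getElem_map, List.getElem_range]
  by_cases h : a = n
  · subst h
    simp only [if_pos rfl]
    apply List.ext_getElem
    · simp
    intro m hm1 hm2
    have hm : m < C := by simpa using hm2
    simp only [List.getElem_set, List.getElem_map, List.getElem_range, updF]
    rcases eq_or_ne b m with rfl | h
    · simp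
    · simp [h, Ne.symm h]
  · simp only [if_neg h, updF]
    apply List.map_congr_left
    intro m hm
    have : ¬(n = a ∧ m = b) := by tauto
    simp [this]
theorem setValue_mapGrid (R C a b : Nat) (f : Nat → Nat → Int) (v : Int)
    (ha : a < R) (hb : b < C) (hR : 0 < R) :
    solveSetValue (mapGrid R C f) (a : Int) (b : Int) v = mapGrid R C (updF f a b v) := by
  have h1 : (mapGrid R C f).length = R := by simp [mapGrid]
  have h2 := mapGrid_headD R C f hR
  rw [solveSetValue, if_pos (by rw [h1, h2]; refine ⟨by positivity, by exact_mod_cast ha, by positivity, by exact_mod_cast hb⟩)]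
  simpa using mapGrid_set R C a b f v ha hb
abbrev Pm (i j a b : Nat) : Prop := a < i ∨ (a = i ∧ b < j)
def Ecell (input : List (List Int)) (R C i j a b : Nat) : Int :=
  if (a + 1 < R ∧ Pm i j (a + 1) b) ∧ solveIn input (a + 1) b = 2 then 2
  else if (b + 1 < C ∧ Pm i j a (b + 1)) ∧ solveIn input a (b + 1) = 8 then 8
  else if Pm i j a b then solveIn input a b
  else if (1 ≤ b ∧ Pm i j a (b - 1)) ∧ solveIn input a (b - 1) = 8 then 8
  else if (1 ≤ a ∧ Pm i j (a - 1) b) ∧ solveIn input (a - 1) b = 2 then 2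
  else 0
def stepF (input : List (List Int)) (R C i j : Nat) (f : Nat → Nat → Int) : Nat → Nat → Int :=
  let f1 := updF f i j (solveIn input i j)
  let f2 := if solveIn input i j = 8 then
      let t := if (j : Int) + 1 < (C : Int) then updF f1 i (j + 1) 8 else f1
      if (0 : Int) ≤ (j : Int) - 1 then updF t i (j - 1) 8 else t
    else f1
  if solveIn input i j = 2 then
      let t := if (i : Int) + 1 < (R : Int) then updF f2 (i + 1) j 2 else f2
      if (0 : Int) ≤ (i : Int) - 1 then updF t (i - 1) j 2 else t
    else f2

theorem cond_set (c : Prop) [Decidable c] (R C : Nat) (f : Nat → Nat → Int)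
    (g : List (List Int)) (ii jj : Int) (a b : Nat) (v : Int)
    (hg : g = mapGrid R C f) (hR : 0 < R)
    (hc : c → ii = (a : Int) ∧ jj = (b : Int) ∧ a < R ∧ b < C) :
    (if c then solveSetValue g ii jj v else g) = mapGrid R C (if c then updF f a b v else f) := by
  split_ifs with h
  · obtain ⟨h1, h2, h3, h4⟩ := hc h
    rw [hg, h1, h2, setValue_mapGrid R C a b f v h3 h4 hR]
  · exact hg

theorem solveStep_mapGrid (input : List (List Int)) (f : Nat → Nat → Int) (i j : Nat)
    (hi : i < input.length) (hj : j < (input.headD []).length) :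
    solveStep input (mapGrid input.length (input.headD []).length f) i j
      = mapGrid input.length (input.headD []).length (stepF input input.length (input.headD []).length i j f) := by
  have hR : 0 < input.length := by omega
  simp only [solveStep, stepF, ge_iff_le]
  have H1 := mapGrid_set input.length (input.headD []).length i j f (solveIn input i j) hi hj
  have H2 := cond_set ((j : Int) + 1 < ((input.headD []).length : Int)) input.length (input.headD []).length
      _ _ (i : Int) ((j : Int) + 1) i (j + 1) 8 H1 hR (by intro h; refine ⟨rfl, by omega, hi, by omega⟩)
  have H3 := cond_set ((0 : Int) ≤ (j : Int) - 1) input.length (input.headD []).length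
      _ _ (i : Int) ((j : Int) - 1) i (j - 1) 8 H2 hR (by intro h; refine ⟨rfl, by omega, hi, by omega⟩)
  rcases eq_or_ne (solveIn input i j) 8 with h8 | h8
  · have h2 : ¬ (solveIn input i j = 2) := by rw [h8]; decide
    simp only [if_pos h8, if_neg h2]
    exact H3
  · simp only [if_neg h8]
    rcases eq_or_ne (solveIn input i j) 2 with h2 | h2
    · simp only [if_pos h2]
      have H4 := cond_set ((i : Int) + 1 < (input.length : Int)) input.length (input.headD []).length
          _ _ ((i : Int) + 1) (j : Int) (i + 1) j 2 H1 hR (by intro h; exact ⟨by omega, rfl, by omega, hj⟩)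
      have H5 := cond_set ((0 : Int) ≤ (i : Int) - 1) input.length (input.headD []).length
          _ _ ((i : Int) - 1) (j : Int) (i - 1) j 2 H4 hR (by intro h; exact ⟨by omega, rfl, by omega, hj⟩)
      exact H5
    · simp only [if_neg h2]
      exact H1

theorem ifApp2 (c : Prop) [Decidable c] (f g : Nat → Nat → Int) (x y : Nat) :
    (if c then f else g) x y = if c then f x y else g x y := by
  split_ifs <;> rfl

theorem Ecell_congr (input : List (List Int)) (R C i j i' j' a b : Nat)
    (q1 : Pm i j (a + 1) b ↔ Pm i' j' (a + 1) b) (q2 : Pm i j a (b + 1) ↔ Pm i' j' a (b + 1))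
    (q3 : Pm i j a b ↔ Pm i' j' a b) (q4 : Pm i j a (b - 1) ↔ Pm i' j' a (b - 1))
    (q5 : Pm i j (a - 1) b ↔ Pm i' j' (a - 1) b) :
    Ecell input R C i j a b = Ecell input R C i' j' a b := by
  simp only [Ecell, q1, q2, q3, q4, q5]

set_option maxHeartbeats 4000000 in
theorem stepF_Ecell (input : List (List Int)) (R C i j a b : Nat)
    (hi : i < R) (hj : j < C) (ha : a < R) (hb : b < C) :
    stepF input R C i j (Ecell input R C i j) a b = Ecell input R C i (j + 1) a b := by
  have e1 : ((j : Int) + 1 < (C : Int)) ↔ j + 1 < C := by omega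
  have e2 : ((0 : Int) ≤ (j : Int) - 1) ↔ 1 ≤ j := by omega
  have e3 : ((i : Int) + 1 < (R : Int)) ↔ i + 1 < R := by omega
  have e4 : ((0 : Int) ≤ (i : Int) - 1) ↔ 1 ≤ i := by omega
  rcases eq_or_ne (solveIn input i j) 8 with h8 | h8
  · have h2 : solveIn input i j ≠ 2 := by rw [h8]; decide
    simp only [stepF, if_pos h8, if_neg h2, ifApp2, updF, e1, e2, e3, e4]
    by_cases c1 : a = i ∧ b = j
    · obtain ⟨rfl, rfl⟩ := c1
      simp [Ecell, Pm, Nat.add_sub_cancel]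
      all_goals first | omega | (split_ifs <;> omega)
    by_cases c2 : a = i ∧ b = j + 1
    · obtain ⟨rfl, rfl⟩ := c2
      simp [Ecell, Pm, Nat.add_sub_cancel]
      all_goals first | omega | (split_ifs <;> omega)
    by_cases c3 : a = i ∧ j = b + 1
    · obtain ⟨rfl, h⟩ := c3
      subst h
      simp [Ecell, Pm, Nat.add_sub_cancel]
      all_goals first | omega | (split_ifs <;> omega)
    by_cases c4 : a = i + 1 ∧ b = j
    · obtain ⟨rfl, rfl⟩ := c4
      simp [Ecell, Pm, Nat.add_sub_cancel]
      all_goals first | omega | (split_ifs <;> omega)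
    by_cases c5 : i = a + 1 ∧ b = j
    · obtain ⟨h, rfl⟩ := c5
      subst h
      simp [Ecell, Pm, Nat.add_sub_cancel]
      all_goals first | omega | (split_ifs <;> omega)
    · have n1 : ¬(a = i ∧ b = j) := c1
      have n2 : ¬(a = i ∧ b = j + 1) := c2
      have n3 : ¬(a = i ∧ b = j - 1) := by omega
      have n4 : ¬(a = i + 1 ∧ b = j) := c4
      have n5 : ¬(a = i - 1 ∧ b = j) := by omega
      simp only [if_neg n1, if_neg n2, if_neg n3, if_neg n4, if_neg n5, ite_self]
      exact Ecell_congr input R C i j i (j + 1) a b (by simp only [Pm]; omega)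
        (by simp only [Pm]; omega) (by simp only [Pm]; omega) (by simp only [Pm]; omega)
        (by simp only [Pm]; omega)
  · rcases eq_or_ne (solveIn input i j) 2 with h2 | h2
    · simp only [stepF, if_neg h8, if_pos h2, ifApp2, updF, e1, e2, e3, e4]
      by_cases c1 : a = i ∧ b = j
      · obtain ⟨rfl, rfl⟩ := c1
        simp [Ecell, Pm, Nat.add_sub_cancel]
        all_goals first | omega | (split_ifs <;> omega)
      by_cases c2 : a = i ∧ b = j + 1
      · obtain ⟨rfl, rfl⟩ := c2
        simp [Ecell, Pm, Nat.add_sub_cancel]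
        all_goals first | omega | (split_ifs <;> omega)
      by_cases c3 : a = i ∧ j = b + 1
      · obtain ⟨rfl, h⟩ := c3
        subst h
        simp [Ecell, Pm, Nat.add_sub_cancel]
        all_goals first | omega | (split_ifs <;> omega)
      by_cases c4 : a = i + 1 ∧ b = j
      · obtain ⟨rfl, rfl⟩ := c4
        simp [Ecell, Pm, Nat.add_sub_cancel]
        all_goals first | omega | (split_ifs <;> omega)
      by_cases c5 : i = a + 1 ∧ b = j
      · obtain ⟨h, rfl⟩ := c5
        subst h
        simp [Ecell, Pm, Nat.add_sub_cancel]
        all_goals first | omega | (split_ifs <;> omega)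
      · have n1 : ¬(a = i ∧ b = j) := c1
        have n2 : ¬(a = i ∧ b = j + 1) := c2
        have n3 : ¬(a = i ∧ b = j - 1) := by omega
        have n4 : ¬(a = i + 1 ∧ b = j) := c4
        have n5 : ¬(a = i - 1 ∧ b = j) := by omega
        simp only [if_neg n1, if_neg n2, if_neg n3, if_neg n4, if_neg n5, ite_self]
        exact Ecell_congr input R C i j i (j + 1) a b (by simp only [Pm]; omega)
          (by simp only [Pm]; omega) (by simp only [Pm]; omega) (by simp only [Pm]; omega)
          (by simp only [Pm]; omega)
    · simp only [stepF, if_neg h8, if_neg h2, ifApp2, updF, e1, e2, e3, e4]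
      by_cases c1 : a = i ∧ b = j
      · obtain ⟨rfl, rfl⟩ := c1
        simp [Ecell, Pm, Nat.add_sub_cancel]
        all_goals first | omega | (split_ifs <;> omega)
      by_cases c2 : a = i ∧ b = j + 1
      · obtain ⟨rfl, rfl⟩ := c2
        simp [Ecell, Pm, Nat.add_sub_cancel]
        all_goals first | omega | (split_ifs <;> omega)
      by_cases c3 : a = i ∧ j = b + 1
      · obtain ⟨rfl, h⟩ := c3
        subst h
        simp [Ecell, Pm, Nat.add_sub_cancel]
        all_goals first | omega | (split_ifs <;> omega)
      by_cases c4 : a = i + 1 ∧ b = j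
      · obtain ⟨rfl, rfl⟩ := c4
        simp [Ecell, Pm, Nat.add_sub_cancel]
        all_goals first | omega | (split_ifs <;> omega)
      by_cases c5 : i = a + 1 ∧ b = j
      · obtain ⟨h, rfl⟩ := c5
        subst h
        simp [Ecell, Pm, Nat.add_sub_cancel]
        all_goals first | omega | (split_ifs <;> omega)
      · have n1 : ¬(a = i ∧ b = j) := c1
        have n2 : ¬(a = i ∧ b = j + 1) := c2
        have n3 : ¬(a = i ∧ b = j - 1) := by omega
        have n4 : ¬(a = i + 1 ∧ b = j) := c4
        have n5 : ¬(a = i - 1 ∧ b = j) := by omega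
        simp only [if_neg n1, if_neg n2, if_neg n3, if_neg n4, if_neg n5, ite_self]
        exact Ecell_congr input R C i j i (j + 1) a b (by simp only [Pm]; omega)
          (by simp only [Pm]; omega) (by simp only [Pm]; omega) (by simp only [Pm]; omega)
          (by simp only [Pm]; omega)

def Egrid (input : List (List Int)) (R C i j : Nat) : List (List Int) :=
  mapGrid R C (Ecell input R C i j)

theorem mapGrid_congr (R C : Nat) (f g : Nat → Nat → Int)
    (h : ∀ a, a < R → ∀ b, b < C → f a b = g a b) : mapGrid R C f = mapGrid R C g := by
  unfold mapGrid
  apply List.map_congr_left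
  intro a hma
  apply List.map_congr_left
  intro b hmb
  exact h a (List.mem_range.mp hma) b (List.mem_range.mp hmb)

theorem Ecell_congr2 (input : List (List Int)) (R C i j i' j' a b : Nat)
    (q1 : ((a + 1 < R ∧ Pm i j (a + 1) b) ∧ solveIn input (a + 1) b = 2) ↔
          ((a + 1 < R ∧ Pm i' j' (a + 1) b) ∧ solveIn input (a + 1) b = 2))
    (q2 : ((b + 1 < C ∧ Pm i j a (b + 1)) ∧ solveIn input a (b + 1) = 8) ↔
          ((b + 1 < C ∧ Pm i' j' a (b + 1)) ∧ solveIn input a (b + 1) = 8))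
    (q3 : Pm i j a b ↔ Pm i' j' a b)
    (q4 : ((1 ≤ b ∧ Pm i j a (b - 1)) ∧ solveIn input a (b - 1) = 8) ↔
          ((1 ≤ b ∧ Pm i' j' a (b - 1)) ∧ solveIn input a (b - 1) = 8))
    (q5 : ((1 ≤ a ∧ Pm i j (a - 1) b) ∧ solveIn input (a - 1) b = 2) ↔
          ((1 ≤ a ∧ Pm i' j' (a - 1) b) ∧ solveIn input (a - 1) b = 2)) :
    Ecell input R C i j a b = Ecell input R C i' j' a b := by
  simp only [Ecell, q1, q2, q3, q4, q5]

theorem step_Egrid (input : List (List Int)) (i j : Nat)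
    (hi : i < input.length) (hj : j < (input.headD []).length) :
    solveStep input (Egrid input input.length (input.headD []).length i j) i j
      = Egrid input input.length (input.headD []).length i (j + 1) := by
  unfold Egrid
  rw [solveStep_mapGrid input _ i j hi hj]
  exact mapGrid_congr _ _ _ _ (fun a ha b hb => stepF_Ecell input _ _ i j a b hi hj ha hb)

theorem Egrid_row_end (input : List (List Int)) (i : Nat) :
    Egrid input input.length (input.headD []).length i (input.headD []).length
      = Egrid input input.length (input.headD []).length (i + 1) 0 := by
  unfold Egrid
  apply mapGrid_congr
  intro a ha b hb
  exact Ecell_congr2 input _ _ i _ (i + 1) 0 a b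
    (by simp only [Pm]; omega) (by simp only [Pm]; omega) (by simp only [Pm]; omega)
    (by simp only [Pm]; omega) (by simp only [Pm]; omega)

theorem inner_aux (input : List (List Int)) (i : Nat) (hi : i < input.length) :
    ∀ n j, j + n = (input.headD []).length →
    (List.range' j n).foldl (fun g j => solveStep input g i j)
        (Egrid input input.length (input.headD []).length i j)
      = Egrid input input.length (input.headD []).length i ((input.headD []).length) := by
  intro n
  induction n with
  | zero =>
      intro j h
      simp only [List.range', List.foldl_nil]
      have hj : j = (input.headD []).length := by omega
      subst hj
      rfl
  | succ n ih =>
      intro j h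
      rw [List.range'_succ, List.foldl_cons, step_Egrid input i j hi (by omega)]
      exact ih (j + 1) (by omega)

theorem outer_aux (input : List (List Int)) :
    ∀ n i, i + n = input.length →
    (List.range' i n).foldl (fun g i =>
        (List.range (input.headD []).length).foldl (fun g j => solveStep input g i j) g)
        (Egrid input input.length (input.headD []).length i 0)
      = Egrid input input.length (input.headD []).length input.length 0 := by
  intro n
  induction n with
  | zero =>
      intro i h
      simp only [List.range', List.foldl_nil]
      have hi : i = input.length := by omega
      subst hi
      rfl
  | succ n ih =>
      intro i h
      rw [List.range'_succ, List.foldl_cons]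
      have Hin : (List.range (input.headD []).length).foldl (fun g j => solveStep input g i j)
          (Egrid input input.length (input.headD []).length i 0)
          = Egrid input input.length (input.headD []).length i ((input.headD []).length) := by
        rw [List.range_eq_range']
        exact inner_aux input i (by omega) ((input.headD []).length) 0 (by omega)
      rw [Hin, Egrid_row_end]
      exact ih (i + 1) (by omega)

theorem Egrid_init (input : List (List Int)) :
    (List.range input.length).map (fun _ => (List.range (input.headD []).length).map (fun _ => (0 : Int)))
      = Egrid input input.length (input.headD []).length 0 0 := by
  unfold Egrid
  have : (List.range input.length).map (fun _ => (List.range (input.headD []).length).map (fun _ => (0 : Int)))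
      = mapGrid input.length (input.headD []).length (fun _ _ => 0) := rfl
  rw [this]
  apply mapGrid_congr
  intro a ha b hb
  simp [Ecell, Pm]

theorem solve_eq_Egrid (input : List (List Int)) :
    solve input = Egrid input input.length (input.headD []).length input.length 0 := by
  show (List.range input.length).foldl _ _ = _
  rw [Egrid_init, show List.range input.length = List.range' 0 input.length from List.range_eq_range']
  exact outer_aux input input.length 0 (by omega)

theorem Egrid_final (input : List (List Int)) :
    Egrid input input.length (input.headD []).length input.length 0 = solve_alt input := by
  have : solve_alt input = mapGrid input.length (input.headD []).length
      (fun i j =>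
        if i + 1 < input.length ∧ (input.getD (i + 1) []).getD j 0 = 2 then 2
        else if j + 1 < (input.headD []).length ∧ (input.getD i []).getD (j + 1) 0 = 8 then 8
        else (input.getD i []).getD j 0) := rfl
  rw [this]
  unfold Egrid
  apply mapGrid_congr
  intro a ha b hb
  simp only [Ecell, Pm, solveIn]
  split_ifs <;> omega

theorem solve_eq_alt (input : List (List Int)) : solve input = solve_alt input := by
  rw [solve_eq_Egrid, Egrid_final]

-- ===== VERDICT (by name: the statement is the Claim_ definition above) =====
theorem solve_spec : Claim_equal_solve := by
  intro input _ _
  unfold Spec_solve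
  exact solve_eq_alt input
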